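-- pv_equiv track=rewrite | github.com/1250080193-gif/webgis_circlek_gs25 | tools/views.py | _normalize_brand
-- ===== SOURCE A (Python) =====
-- ALIASES = {
--     "CIRCLEK": ["CIRCLEK", "CIRCLE K", "CIRCLE_K", "CIRCLE-K"],
--     "GS25": ["GS25", "GS 25"],
-- }
--
-- def _normalize_brand(raw: str) -> str:
--     b = (raw or "").strip().upper()
--     if b in ALIASES:
--         return b
--     for key, arr in ALIASES.items():
--         if b in [x.upper() for x in arr]:
--             return key
--     return ""
-- ===== SOURCE B (Python) =====
-- ALIASES = {
--     "CIRCLEK": ["CIRCLEK", "CIRCLE K", "CIRCLE_K", "CIRCLE-K"],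
--     "GS25": ["GS25", "GS 25"],
-- }
--
-- REVERSE = {x.upper(): key for key, arr in ALIASES.items() for x in arr}
--
-- def _normalize_brand(raw: str) -> str:
--     return REVERSE.get((raw or "").strip().upper(), "")
-- ===== Notes on version B (the rewrite author's own statement) =====
-- stated objective: idiomatic
-- what changed: Replaces the per-call dict-key check and the scanning loop over alias lists with a single reverse-lookup dict built once at module load, so the function body is one table lookup.
import Mathlib
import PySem

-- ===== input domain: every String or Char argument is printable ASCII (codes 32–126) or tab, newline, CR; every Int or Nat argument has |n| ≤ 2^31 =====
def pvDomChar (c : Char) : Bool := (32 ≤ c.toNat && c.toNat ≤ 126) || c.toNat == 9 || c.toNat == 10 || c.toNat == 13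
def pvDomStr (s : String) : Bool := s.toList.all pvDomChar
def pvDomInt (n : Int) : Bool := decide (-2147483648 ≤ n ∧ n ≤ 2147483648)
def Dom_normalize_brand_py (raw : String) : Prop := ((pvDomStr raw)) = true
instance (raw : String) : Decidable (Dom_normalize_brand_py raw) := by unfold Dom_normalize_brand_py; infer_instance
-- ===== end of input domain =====

-- B replaces A's per-call key check + scan over alias lists by a reverse-lookup table
-- built once, so the function is a single dict lookup (objective: idiomatic).

-- ===== PORT A =====
-- module constant ALIASES (a dict: association list in insertion order)
def pyALIASES : List (String × List String) :=
  [("CIRCLEK", ["CIRCLEK", "CIRCLE K", "CIRCLE_K", "CIRCLE-K"]),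
   ("GS25", ["GS25", "GS 25"])]

-- the 'for key, arr in ALIASES.items()' loop with its early return
def pyAliasScan (b : String) : List (String × List String) → String
  | [] => ""
  | (key, arr) :: rest =>
      if (arr.map PySem.Str.upper).contains b then key else pyAliasScan b rest

def normalize_brand_py (raw : String) : String :=
  let b := PySem.Str.upper (PySem.Str.strip (if raw = "" then "" else raw))
  if (pyALIASES.map Prod.fst).contains b then b
  else pyAliasScan b pyALIASES

-- ===== PORT B =====
-- REVERSE = {x.upper(): key for key, arr in ALIASES.items() for x in arr}  (built once)
def pyREVERSE : PySem.Dict String String :=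
  pyALIASES.foldl
    (fun d p => p.2.foldl (fun d x => d.insert (PySem.Str.upper x) p.1) d)
    PySem.Dict.empty

def normalize_brand_py_alt (raw : String) : String :=
  PySem.Dict.getD pyREVERSE (PySem.Str.upper (PySem.Str.strip (if raw = "" then "" else raw))) ""

-- ===== PRECONDITION & SPEC =====
def Spec_normalize_brand_py (raw : String) (out : String) : Prop := out = normalize_brand_py_alt raw
instance (raw : String) (out : String) : Decidable (Spec_normalize_brand_py raw out) := by unfold Spec_normalize_brand_py; infer_instance

-- ===== CLAIM (what is proved, stated in full; the proofs are below) =====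
def Claim_equal_normalize_brand_py : Prop := ∀ (raw : String), Dom_normalize_brand_py raw → Spec_normalize_brand_py raw (normalize_brand_py raw)

-- ===== LEMMAS AND PROOFS =====

-- both ports apply the same function of b := (raw or "").strip().upper(); it suffices
-- to compare them pointwise in b, by cases on b against the six alias strings
theorem core_eq (b : String) :
    (if (pyALIASES.map Prod.fst).contains b then b else pyAliasScan b pyALIASES)
      = PySem.Dict.getD pyREVERSE b "" := by
  by_cases h1 : b = "CIRCLEK"; · subst h1; decide
  by_cases h2 : b = "CIRCLE K"; · subst h2; decide
  by_cases h3 : b = "CIRCLE_K"; · subst h3; decide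
  by_cases h4 : b = "CIRCLE-K"; · subst h4; decide
  by_cases h5 : b = "GS25"; · subst h5; decide
  by_cases h6 : b = "GS 25"; · subst h6; decide
  have hR : pyREVERSE = PySem.Dict.mk
      [("CIRCLEK", "CIRCLEK"), ("CIRCLE K", "CIRCLEK"), ("CIRCLE_K", "CIRCLEK"),
       ("CIRCLE-K", "CIRCLEK"), ("GS25", "GS25"), ("GS 25", "GS25")] := by decide
  have u1 : PySem.Str.upper "CIRCLEK" = "CIRCLEK" := by decide
  have u2 : PySem.Str.upper "CIRCLE K" = "CIRCLE K" := by decide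
  have u3 : PySem.Str.upper "CIRCLE_K" = "CIRCLE_K" := by decide
  have u4 : PySem.Str.upper "CIRCLE-K" = "CIRCLE-K" := by decide
  have u5 : PySem.Str.upper "GS25" = "GS25" := by decide
  have u6 : PySem.Str.upper "GS 25" = "GS 25" := by decide
  simp [pyALIASES, pyAliasScan, hR, PySem.Dict.getD_eq_get?_getD,
        PySem.Dict.get?, u1, u2, u3, u4, u5, u6,
        h1, h2, h3, h4, h5, h6, Ne.symm]

-- ===== VERDICT (by name: the statement is the Claim_ definition above) =====
theorem normalize_brand_py_spec : Claim_equal_normalize_brand_py := by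
  intro raw _
  unfold Spec_normalize_brand_py normalize_brand_py normalize_brand_py_alt
  exact core_eq _
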